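-- pv_equiv track=rewrite | github.com/sane-lab/flink-testbed | exp_scripts/sluice/latency_cdf.py | parseMapping
-- ===== SOURCE A (Python) =====
-- def parseMapping(split):
--     mapping = {}
--     for word in split:
--         word = word.lstrip("{").rstrip("}")
--         if "=" in word:
--             x = word.split("=")
--             job = x[0].split("_")[0]
--             task = x[0]
--             key = x[1].lstrip("[").rstrip(",").rstrip("]")
--             if job not in mapping:
--                 mapping[job] = {}
--             mapping[job][task] = [key]
--         else:
--             key = word.rstrip(",").rstrip("]")
--             mapping[job][task] += [key]
--     return mapping
-- ===== SOURCE B (Python) =====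
-- def parseMapping(split):
--     # Pass 1: partition the tokens into groups, opening a new group at each
--     # header token (one containing '='); a group is (header, body_tokens).
--     groups = []
--     for word in split:
--         w = word.lstrip("{").rstrip("}")
--         if "=" in w:
--             groups.append((w, []))
--         else:
--             groups[-1][1].append(w)  # IndexError if no header seen yet
--     # Pass 2: build the nested mapping, one whole group at a time.
--     mapping = {}
--     for head, body in groups:
--         x = head.split("=")
--         job = x[0].split("_")[0]
--         task = x[0]
--         keys = [x[1].lstrip("[").rstrip(",").rstrip("]")] + \
--                [b.rstrip(",").rstrip("]") for b in body]
--         mapping.setdefault(job, {})[task] = keys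
--     return mapping
-- ===== Notes on version B (the rewrite author's own statement) =====
-- stated objective: alternative
-- what changed: Replaces A's single stateful scan (carrying the last job/task across iterations and mutating the nested dict token by token) with a two-pass decomposition: first partition the tokens into (header, body) groups at each '='-token, then build each mapping[job][task] entry from a whole group at once.
import Mathlib
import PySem

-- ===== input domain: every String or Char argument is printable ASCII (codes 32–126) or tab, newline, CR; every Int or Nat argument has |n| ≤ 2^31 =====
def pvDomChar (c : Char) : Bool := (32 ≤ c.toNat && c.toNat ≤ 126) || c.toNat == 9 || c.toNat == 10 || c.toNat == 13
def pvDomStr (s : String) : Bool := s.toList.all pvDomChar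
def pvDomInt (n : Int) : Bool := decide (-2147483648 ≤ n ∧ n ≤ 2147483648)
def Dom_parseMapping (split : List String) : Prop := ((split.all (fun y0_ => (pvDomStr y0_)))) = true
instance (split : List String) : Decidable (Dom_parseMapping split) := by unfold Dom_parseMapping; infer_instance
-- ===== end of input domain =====

-- B re-parses the token stream in two passes (group tokens by header, then build the
-- mapping group by group) instead of A's single stateful scan; objective: alternative
-- decomposition (same cost). Equality is about the returned mapping.

-- shared helpers = the Python builtins both sources call --
-- s.lstrip(chars): drop the leading chars in `chars` (exact: Python drops while the char is in the set)
def pyLstrip (cs : List Char) (chars : List Char) : List Char := cs.dropWhile (chars.contains ·)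
-- s.rstrip(chars): drop the trailing chars in `chars` (exact: reverse, drop, reverse)
def pyRstrip (cs : List Char) (chars : List Char) : List Char := (cs.reverse.dropWhile (chars.contains ·)).reverse
-- word.lstrip("{").rstrip("}")
def stripWord (s : String) : String := String.ofList (pyRstrip (pyLstrip s.toList ['{']) ['}'])
-- w.rstrip(",").rstrip("]")
def trimBody (s : String) : String := String.ofList (pyRstrip (pyRstrip s.toList [',']) [']'])
-- x = w.split("=") (sep nonempty, never fails); x[0], x[1] as both sources read them
def eqSplit (w : String) : List (List Char) := (PySem.Chars.split? w.toList ['=']).getD []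
-- job = x[0].split("_")[0]
def headerJob (w : String) : String := String.ofList (((PySem.Chars.split? ((eqSplit w).headD []) ['_']).getD []).headD [])
-- task = x[0]
def headerTask (w : String) : String := String.ofList ((eqSplit w).headD [])
-- key = x[1].lstrip("[").rstrip(",").rstrip("]")  (x[1] exists: "=" is in w)
def headerKey (w : String) : String := String.ofList (pyRstrip (pyRstrip (pyLstrip ((eqSplit w).getD 1 []) ['[']) [',']) [']'])

def JMap : Type := PySem.Dict String (PySem.Dict String (List String))

-- ===== PORT A =====
-- state = (mapping, job, task); job/task start as "" (Python: unbound; Pre_ makes them unread before the first header)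
def stepA (st : JMap × String × String) (word : String) : JMap × String × String :=
  let w := stripWord word
  if PySem.Str.isIn "=" w then
    let job := headerJob w
    let task := headerTask w
    let key := headerKey w
    -- if job not in mapping: mapping[job] = {};  mapping[job][task] = [key]
    (st.1.insert job ((st.1.getD job PySem.Dict.empty).insert task [key]), job, task)
  else
    let key := trimBody w
    -- mapping[job][task] += [key]
    let inner := st.1.getD st.2.1 PySem.Dict.empty
    (st.1.insert st.2.1 (inner.insert st.2.2 (inner.getD st.2.2 [] ++ [key])), st.2.1, st.2.2)

def parseMapping (split : List String) : List (String × List (String × List String)) :=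
  let fin := split.foldl stepA (PySem.Dict.empty, "", "")
  fin.1.items.map (fun p => (p.1, p.2.items))

-- ===== PORT B =====
-- groups[-1][1].append(w)  (on [] Python raises IndexError; unreachable under Pre_)
def appendLastBody (gs : List (String × List String)) (w : String) : List (String × List String) :=
  match gs with
  | [] => []
  | [g] => [(g.1, g.2 ++ [w])]
  | g :: rest => g :: appendLastBody rest w

-- pass-1 step: open a new group on a header token, else extend the last group's body
def addTok (gs : List (String × List String)) (word : String) : List (String × List String) :=
  let w := stripWord word
  if PySem.Str.isIn "=" w then gs ++ [(w, [])] else appendLastBody gs w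

-- pass-2 step: mapping.setdefault(job, {})[task] = keys
def stepG (d : JMap) (g : String × List String) : JMap :=
  let job := headerJob g.1
  let task := headerTask g.1
  let keys := headerKey g.1 :: g.2.map trimBody
  d.insert job ((d.getD job PySem.Dict.empty).insert task keys)

def parseMapping_alt (split : List String) : List (String × List (String × List String)) :=
  let groups := split.foldl addTok []
  let fin := groups.foldl stepG PySem.Dict.empty
  fin.items.map (fun p => (p.1, p.2.items))

-- ===== PRECONDITION & SPEC =====
-- Pre_ excludes only the inputs on which A raises (UnboundLocalError: a first token
-- with no "=" reads the unbound job/task); B raises there too (IndexError).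
def Pre_parseMapping (split : List String) : Prop :=
  split = [] ∨ PySem.Str.isIn "=" (stripWord (split.headD "")) = true
instance (split : List String) : Decidable (Pre_parseMapping split) := by unfold Pre_parseMapping; infer_instance

def pvWitness_parseMapping : List String := ["{a_1=[x,", "y,", "z]}", "b_2=[q]"]

def Spec_parseMapping (split : List String) (out : List (String × List (String × List String))) : Prop := out = parseMapping_alt split
instance (split : List String) (out : List (String × List (String × List String))) : Decidable (Spec_parseMapping split out) := by unfold Spec_parseMapping; infer_instance

-- ===== CLAIM (what is proved, stated in full; the proofs are below) =====
def Claim_equal_parseMapping : Prop := ∀ (split : List String), Dom_parseMapping split → Pre_parseMapping split → Spec_parseMapping split (parseMapping split)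

-- ===== LEMMAS AND PROOFS =====

-- the dict update both header paths perform: d[j] gets d.get(j,{}) with t ↦ ks
def flushJ (d : JMap) (j t : String) (ks : List String) : JMap :=
  d.insert j ((d.getD j PySem.Dict.empty).insert t ks)

theorem appendLastBody_append (gs : List (String × List String)) (g : String × List String) (w : String) :
    appendLastBody (gs ++ [g]) w = gs ++ [(g.1, g.2 ++ [w])] := by
  induction gs with
  | nil => simp [appendLastBody]
  | cons a tl ih =>
      cases tl with
      | nil => simp [appendLastBody]
      | cons b tl' => simpa [appendLastBody] using ih

theorem foldl_addTok_prefix (ts : List String) (gs : List (String × List String)) (g : String × List String) :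
    List.foldl addTok (gs ++ [g]) ts = gs ++ List.foldl addTok [g] ts := by
  induction ts generalizing gs g with
  | nil => simp
  | cons w ts ih =>
      simp only [List.foldl_cons]
      by_cases hw : PySem.Chars.isIn ['='] (stripWord w).toList = true
      · have h1 : addTok (gs ++ [g]) w = (gs ++ [g]) ++ [(stripWord w, [])] := by simp [addTok, hw]
        have h2 : addTok [g] w = [g] ++ [(stripWord w, [])] := by simp [addTok, hw]
        rw [h1, h2, ih, ih, ← List.append_assoc]
      · have hwf : PySem.Chars.isIn ['='] (stripWord w).toList = false := by simpa using hw
        have h1 : addTok (gs ++ [g]) w = gs ++ [(g.1, g.2 ++ [stripWord w])] := by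
          simp only [addTok]
          rw [if_neg (by simp [hwf])]
          exact appendLastBody_append _ _ _
        have h2 : addTok [g] w = [(g.1, g.2 ++ [stripWord w])] := by
          simp only [addTok]
          rw [if_neg (by simp [hwf])]
          rfl
        rw [h1, h2, ih]

-- main invariant: A's scan from a freshly flushed header state equals B's
-- group-by-group evaluation with the current group still open
theorem main_inv (ts : List String) (d : JMap) (h : String) (body : List String) :
    (List.foldl stepA
        (flushJ d (headerJob h) (headerTask h) (headerKey h :: body.map trimBody),
         headerJob h, headerTask h) ts).1
      = List.foldl stepG d (List.foldl addTok [(h, body)] ts) := by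
  induction ts generalizing d h body with
  | nil => simp [stepG, flushJ]
  | cons w ts ih =>
      by_cases hw : PySem.Chars.isIn ['='] (stripWord w).toList = true
      · -- header token: close the current group, open a new one
        have lhs : stepA (flushJ d (headerJob h) (headerTask h) (headerKey h :: body.map trimBody),
                          headerJob h, headerTask h) w
            = (flushJ (flushJ d (headerJob h) (headerTask h) (headerKey h :: body.map trimBody))
                 (headerJob (stripWord w)) (headerTask (stripWord w)) [headerKey (stripWord w)],
               headerJob (stripWord w), headerTask (stripWord w)) := by
          simp [stepA, hw, flushJ]
        have rhs : addTok [(h, body)] w = [(h, body)] ++ [(stripWord w, [])] := by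
          simp [addTok, hw]
        have M := ih (flushJ d (headerJob h) (headerTask h) (headerKey h :: body.map trimBody))
          (stripWord w) []
        simp only [List.map_nil] at M
        rw [List.foldl_cons, lhs, M, List.foldl_cons, rhs, foldl_addTok_prefix,
            List.cons_append, List.nil_append, List.foldl_cons]
        rfl
      · -- body token: extend the open group
        have hwf : PySem.Chars.isIn ['='] (stripWord w).toList = false := by simpa using hw
        have lhs : stepA (flushJ d (headerJob h) (headerTask h) (headerKey h :: body.map trimBody),
                          headerJob h, headerTask h) w
            = (flushJ d (headerJob h) (headerTask h)
                 (headerKey h :: (body ++ [stripWord w]).map trimBody),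
               headerJob h, headerTask h) := by
          simp only [stepA]
          rw [if_neg (by simp [hwf])]
          simp only [flushJ, PySem.Dict.getD_insert_self, PySem.Dict.insert_insert_self,
            List.map_append, List.map_cons, List.map_nil]
          rfl
        have rhs : addTok [(h, body)] w = [(h, body ++ [stripWord w])] := by
          simp only [addTok]
          rw [if_neg (by simp [hwf])]
          rfl
        rw [List.foldl_cons, lhs, ih, List.foldl_cons, rhs]

-- ===== VERDICT (by name: the statement is the Claim_ definition above) =====
theorem parseMapping_spec : Claim_equal_parseMapping := by
  intro split _ hpre
  unfold Spec_parseMapping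
  cases split with
  | nil => rfl
  | cons w ts =>
      have hw : PySem.Chars.isIn ['='] (stripWord w).toList = true := by
        rcases hpre with h | h
        · exact (List.cons_ne_nil w ts h).elim
        · simpa using h
      have l1 : stepA (PySem.Dict.empty, "", "") w
          = (flushJ PySem.Dict.empty (headerJob (stripWord w)) (headerTask (stripWord w))
               [headerKey (stripWord w)],
             headerJob (stripWord w), headerTask (stripWord w)) := by
        simp [stepA, hw, flushJ]
      have l2 : addTok [] w = [(stripWord w, [])] := by simp [addTok, hw]
      have M := main_inv ts PySem.Dict.empty (stripWord w) []
      simp only [List.map_nil] at M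
      simp only [parseMapping, parseMapping_alt, List.foldl_cons, l1, l2, M]
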